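-- pv_equiv track=rewrite | github.com/narekzamanyan97/Metacareers-Programming-Problems | Interview Practice/reverse_to_make_equal.py | reverse_subarray
-- ===== SOURCE A (Python) =====
-- def reverse_subarray(arr, start_index, end_index):
--   return_array = arr.copy()
--
--   reversed_subarray = []
--
--   index = end_index
--
--   while index >= start_index:
--     reversed_subarray.append(return_array[index])
--
--     index -= 1
--
--   index_for_reversed_array = 0
--
--   while start_index <= end_index:
--     return_array[start_index] = reversed_subarray[index_for_reversed_array]
--
--
--     index_for_reversed_array += 1
--     start_index += 1
--
--   return return_array
-- ===== SOURCE B (Python) =====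
-- def reverse_subarray(arr, start_index, end_index):
--   return_array = arr.copy()
--   while start_index < end_index:
--     return_array[start_index], return_array[end_index] = \
--         return_array[end_index], return_array[start_index]
--     start_index += 1
--     end_index -= 1
--   return return_array
-- ===== Notes on version B (the rewrite author's own statement) =====
-- stated objective: simpler
-- what changed: B reverses the segment in place with two converging pointers swapping ends, instead of A's building an auxiliary reversed list in one pass and writing it back in a second pass. Pre_ excludes segments that wrap past the array boundary (start_index negative with end_index - start_index >= len(arr)), where A's reads/writes alias the same positions and its last-write-wins result is accidental.
-- outside the precondition, e.g. on reverse_subarray([1, 2], -2, 1): A returns [2, 1], B returns [1, 2]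
import Mathlib
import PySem

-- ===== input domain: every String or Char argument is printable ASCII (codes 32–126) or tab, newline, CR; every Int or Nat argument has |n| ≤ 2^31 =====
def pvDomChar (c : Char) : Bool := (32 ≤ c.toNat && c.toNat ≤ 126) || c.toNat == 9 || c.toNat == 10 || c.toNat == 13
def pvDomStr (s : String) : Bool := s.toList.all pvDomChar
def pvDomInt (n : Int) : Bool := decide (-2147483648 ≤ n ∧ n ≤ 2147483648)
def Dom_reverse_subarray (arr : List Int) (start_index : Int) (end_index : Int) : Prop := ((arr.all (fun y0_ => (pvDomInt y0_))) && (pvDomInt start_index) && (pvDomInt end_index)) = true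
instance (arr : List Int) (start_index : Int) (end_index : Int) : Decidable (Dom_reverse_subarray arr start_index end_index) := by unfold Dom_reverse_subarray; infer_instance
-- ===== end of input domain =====

-- B reverses the segment in place with two converging swap pointers instead of A's
-- build-reversed-list-then-write-back two passes; equal on Pre_ (no wrap-aliasing segments).


-- ===== PORT A =====
-- first while loop: appends return_array[index] for index = end_index down to start_index
def pvRevLoop1 (ra : List Int) : Nat → Int → List Int → List Int
  | 0, _, acc => acc
  | f + 1, index, acc =>
      pvRevLoop1 ra f (index - 1) (acc ++ [PySem.List.pyGetD ra index 0])

-- second while loop: return_array[start] = reversed_subarray[j]; j += 1; start += 1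
def pvRevLoop2 (rev : List Int) : Nat → Int → Int → List Int → List Int
  | 0, _, _, ra => ra
  | f + 1, s, j, ra =>
      pvRevLoop2 rev f (s + 1) (j + 1)
        (PySem.List.pySetD ra s (PySem.List.pyGetD rev j 0))

def reverse_subarray (arr : List Int) (start_index : Int) (end_index : Int) : List Int :=
  let return_array := arr
  let reversed_subarray :=
    pvRevLoop1 return_array (end_index - start_index + 1).toNat end_index []
  pvRevLoop2 reversed_subarray (end_index - start_index + 1).toNat start_index 0 return_array

-- ===== PORT B =====
-- while start < end: swap return_array[start] and return_array[end]; converge the pointers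
def pvSwapLoop : Nat → Int → Int → List Int → List Int
  | 0, _, _, ra => ra
  | f + 1, s, e, ra =>
      if s < e then
        pvSwapLoop f (s + 1) (e - 1)
          (PySem.List.pySetD (PySem.List.pySetD ra s (PySem.List.pyGetD ra e 0)) e
            (PySem.List.pyGetD ra s 0))
      else ra

def reverse_subarray_alt (arr : List Int) (start_index : Int) (end_index : Int) : List Int :=
  pvSwapLoop (end_index - start_index).toNat start_index end_index arr

-- ===== PRECONDITION & SPEC =====
-- Pre_ excludes segments that wrap past the array boundary (negative start_index with
-- end_index - start_index ≥ len(arr)): there A still returns, but its reads/writes alias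
-- the same positions and its last-write-wins result is accidental (as is B's swap-undo result).
-- It also excludes the inputs where A raises IndexError (some index of [start,end] outside [-len, len)).
def Pre_reverse_subarray (arr : List Int) (start_index : Int) (end_index : Int) : Prop :=
  end_index < start_index ∨
    (-(arr.length : Int) ≤ start_index ∧ end_index < (arr.length : Int) ∧
      end_index - start_index < (arr.length : Int))
instance (arr : List Int) (start_index : Int) (end_index : Int) : Decidable (Pre_reverse_subarray arr start_index end_index) := by unfold Pre_reverse_subarray; infer_instance

def pvWitness_reverse_subarray : List Int × Int × Int := ([1, 2, 3, 4], 1, 3)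

def Spec_reverse_subarray (arr : List Int) (start_index : Int) (end_index : Int) (out : List Int) : Prop := out = reverse_subarray_alt arr start_index end_index
instance (arr : List Int) (start_index : Int) (end_index : Int) (out : List Int) : Decidable (Spec_reverse_subarray arr start_index end_index out) := by unfold Spec_reverse_subarray; infer_instance

-- ===== CLAIM (what is proved, stated in full; the proofs are below) =====
def Claim_equal_reverse_subarray : Prop := ∀ (arr : List Int) (start_index : Int) (end_index : Int), Dom_reverse_subarray arr start_index end_index → Pre_reverse_subarray arr start_index end_index → Spec_reverse_subarray arr start_index end_index (reverse_subarray arr start_index end_index)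

-- ===== LEMMAS AND PROOFS =====

-- getElem? of a Python-indexed single-cell update, for any legal Int index
theorem pv_getElem?_pySetD (n : Nat) (ra : List Int) (a : Int) (v : Int) (p : Nat)
    (hlen : ra.length = n)
    (ha : -(n : Int) ≤ a) (ha' : a < (n : Int)) (hp : p < n) :
    (PySem.List.pySetD ra a v)[p]? =
      if (p : Int) = a ∨ (p : Int) = a + n then some v else ra[p]? := by
  subst hlen
  simp only [PySem.List.pySetD, PySem.List.pySet?, PySem.List.pyIdx?]
  by_cases h0 : 0 ≤ a
  · rw [if_pos h0, if_pos ha']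
    simp only [Option.map_some, Option.getD_some, List.getElem?_set]
    split_ifs with h1 h2 h2 <;> simp_all <;> omega
  · rw [if_neg h0, if_pos ha]
    simp only [Option.map_some, Option.getD_some, List.getElem?_set]
    split_ifs with h1 h2 h2 <;> simp_all <;> omega

-- getElem? at the normalized position equals the Python read at the Int index
theorem pv_getElem?_eq_pyGetD (n : Nat) (ra : List Int) (i : Int) (p : Nat) (d : Int)
    (hlen : ra.length = n)
    (hp : p < n) (h : (p : Int) = i ∨ (p : Int) = i + n) :
    ra[p]? = some (PySem.List.pyGetD ra i d) := by
  subst hlen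
  simp only [PySem.List.pyGetD, PySem.List.pyGet?, PySem.List.pyIdx?]
  rcases h with h | h
  · have h0 : 0 ≤ i := by omega
    have h1 : i < (ra.length : Int) := by omega
    rw [if_pos h0, if_pos h1]
    have : i.toNat = p := by omega
    simp [this, List.getElem?_eq_getElem hp]
  · have h0 : ¬ 0 ≤ i := by omega
    have h1 : -(ra.length : Int) ≤ i := by omega
    rw [if_neg h0, if_pos h1]
    have : ra.length - (-i).toNat = p := by omega
    simp [this, List.getElem?_eq_getElem hp]

-- Python read after a Python write, both at arbitrary legal Int indices
theorem pv_pyGetD_pySetD (n : Nat) (ra : List Int) (a : Int) (v : Int) (i : Int) (d : Int)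
    (hlen : ra.length = n)
    (ha : -(n : Int) ≤ a) (ha' : a < (n : Int)) (hi : -(n : Int) ≤ i) (hi' : i < (n : Int)) :
    PySem.List.pyGetD (PySem.List.pySetD ra a v) i d =
      if i = a ∨ i = a + n ∨ i = a - n then v else PySem.List.pyGetD ra i d := by
  set p : Nat := if 0 ≤ i then i.toNat else (i + n).toNat with hpdef
  have hp : p < n := by simp only [hpdef]; split <;> omega
  have hpi : (p : Int) = i ∨ (p : Int) = i + n := by simp only [hpdef]; split <;> omega
  have h2 := pv_getElem?_eq_pyGetD n (PySem.List.pySetD ra a v) i p d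
    (by simp [PySem.List.length_pySetD, hlen]) hp hpi
  have h3 := pv_getElem?_eq_pyGetD n ra i p d hlen hp hpi
  have h1 := pv_getElem?_pySetD n ra a v p hlen ha ha' hp
  rw [h2, h3] at h1
  split_ifs at h1 ⊢ with hc hd
  · exact Option.some.inj h1
  · exfalso; omega
  · exfalso; omega
  · exact Option.some.inj h1

theorem pv_length_loop2 (rev : List Int) (f : Nat) (s j : Int) (ra : List Int) :
    (pvRevLoop2 rev f s j ra).length = ra.length := by
  induction f generalizing s j ra with
  | zero => rfl
  | succ f ih => simp [pvRevLoop2, ih, PySem.List.length_pySetD]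

theorem pv_length_swapLoop (f : Nat) (s e : Int) (ra : List Int) :
    (pvSwapLoop f s e ra).length = ra.length := by
  induction f generalizing s e ra with
  | zero => rfl
  | succ f ih =>
      simp only [pvSwapLoop]
      split
      · simp [ih, PySem.List.length_pySetD]
      · rfl

-- A's first loop builds exactly the segment read back-to-front
theorem pv_loop1_eq (ra : List Int) (f : Nat) (i : Int) (acc : List Int) :
    pvRevLoop1 ra f i acc =
      acc ++ (List.range f).map (fun (k : Nat) => PySem.List.pyGetD ra (i - (k : Int)) 0) := by
  induction f generalizing i acc with
  | zero => simp [pvRevLoop1]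
  | succ f ih =>
      rw [pvRevLoop1, ih, List.range_succ_eq_map]
      simp only [List.map_cons, List.map_map, List.append_assoc, List.singleton_append]
      congr 2
      · norm_num
      · apply List.map_congr_left
        intro k _
        simp only [Function.comp_apply]
        congr 1
        push_cast
        ring

-- reading the built reversed list at a legal offset
theorem pv_rev_lookup (arr : List Int) (e : Int) (f : Nat) (X : Int)
    (h0 : 0 ≤ X) (h1 : X < f) :
    PySem.List.pyGetD
        ((List.range f).map (fun (k : Nat) => PySem.List.pyGetD arr (e - (k : Int)) 0)) X 0 =
      PySem.List.pyGetD arr (e - X) 0 := by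
  rw [PySem.List.pyGetD_eq_getElem _ _ h0 (by simp only [List.length_map, List.length_range]; omega)]
  simp only [List.getElem_map, List.getElem_range]
  congr 2
  omega

-- characterization of A's write-back loop on every position
theorem pv_loop2_char (n : Nat) (rev : List Int) (f : Nat) (s j : Int) (ra : List Int)
    (hlen : ra.length = n) (hs : -(n : Int) ≤ s) (hf : s + f ≤ (n : Int)) (hfn : f ≤ n)
    (p : Nat) (hp : p < n) :
    (pvRevLoop2 rev f s j ra)[p]? =
      if s ≤ (p : Int) ∧ (p : Int) < s + f then
        some (PySem.List.pyGetD rev (j + ((p : Int) - s)) 0)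
      else if s ≤ (p : Int) - n ∧ (p : Int) - n < s + f then
        some (PySem.List.pyGetD rev (j + ((p : Int) - n - s)) 0)
      else ra[p]? := by
  induction f generalizing s j ra with
  | zero =>
      simp only [pvRevLoop2, Nat.cast_zero, Int.add_zero]
      split_ifs with h1 h2 <;> [omega; omega; rfl]
  | succ f ih =>
      rw [pvRevLoop2]
      rw [ih (s + 1) (j + 1) _ (by simp [PySem.List.length_pySetD, hlen])
        (by omega) (by push_cast at hf ⊢; omega) (by omega)]
      rw [pv_getElem?_pySetD n ra s (PySem.List.pyGetD rev j 0) p hlen hs (by push_cast at hf; omega) hp]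
      have harith : ∀ X Y : Int, X = Y →
          some (PySem.List.pyGetD rev X 0) = some (PySem.List.pyGetD rev Y 0) := by
        intro X Y h; rw [h]
      push_cast
      split_ifs <;> first
        | rfl
        | (apply harith; omega)
        | omega

-- characterization of B's converging-swap loop on every position
theorem pv_swap_char (n : Nat) (f : Nat) (s e : Int) (ra : List Int)
    (hlen : ra.length = n) (hs : -(n : Int) ≤ s) (he : e < (n : Int))
    (hlt : e - s < (n : Int)) (hfuel : e - s ≤ 2 * (f : Int))
    (p : Nat) (hp : p < n) :
    (pvSwapLoop f s e ra)[p]? =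
      if s ≤ (p : Int) ∧ (p : Int) ≤ e then
        some (PySem.List.pyGetD ra (s + e - p) 0)
      else if s ≤ (p : Int) - n ∧ (p : Int) - n ≤ e then
        some (PySem.List.pyGetD ra (s + e - ((p : Int) - n)) 0)
      else ra[p]? := by
  induction f generalizing s e ra with
  | zero =>
      simp only [pvSwapLoop]
      split_ifs with h1 h2
      · exact pv_getElem?_eq_pyGetD n ra (s + e - p) p 0 hlen hp (by omega)
      · exact pv_getElem?_eq_pyGetD n ra (s + e - ((p : Int) - n)) p 0 hlen hp (by omega)
      · rfl
  | succ f ih =>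
      rw [pvSwapLoop]
      by_cases hse : s < e
      · rw [if_pos hse]
        set v1 := PySem.List.pyGetD ra e 0 with hv1
        set v2 := PySem.List.pyGetD ra s 0 with hv2
        set ra1 := PySem.List.pySetD ra s v1 with hra1
        set ra2 := PySem.List.pySetD ra1 e v2 with hra2
        have hlen1 : ra1.length = n := by simp [hra1, PySem.List.length_pySetD, hlen]
        have hlen2 : ra2.length = n := by simp [hra2, PySem.List.length_pySetD, hlen1]
        have hsn : s < (n : Int) := by omega
        have hen : -(n : Int) ≤ e := by omega
        rw [ih (s + 1) (e - 1) ra2 hlen2 (by omega) (by omega) (by omega)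
          (by push_cast at hfuel ⊢; omega)]
        have hq : ra2[p]? =
            if (p : Int) = e ∨ (p : Int) = e + n then some v2
            else if (p : Int) = s ∨ (p : Int) = s + n then some v1
            else ra[p]? := by
          rw [pv_getElem?_pySetD n ra1 e v2 p hlen1 hen he hp]
          rw [pv_getElem?_pySetD n ra s v1 p hlen hs hsn hp]
        have hv : ∀ i : Int, -(n : Int) ≤ i → i < n →
            PySem.List.pyGetD ra2 i 0 =
              if i = e ∨ i = e + n ∨ i = e - n then v2
              else if i = s ∨ i = s + n ∨ i = s - n then v1
              else PySem.List.pyGetD ra i 0 := by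
          intro i hi hi'
          rw [hra2, pv_pyGetD_pySetD n ra1 e v2 i 0 hlen1 hen he hi hi']
          rw [hra1, pv_pyGetD_pySetD n ra s v1 i 0 hlen hs hsn hi hi']
        rw [hq]
        have harith : ∀ X Y : Int, X = Y →
            some (PySem.List.pyGetD ra X 0) = some (PySem.List.pyGetD ra Y 0) := by
          intro X Y h; rw [h]
        split_ifs with h1 h2 h3 h4 h5 h6 h7 h8 h9 h10 h11 h12 h13 h14
        all_goals try omega
        all_goals try rfl
        all_goals first
          | (rw [hv _ (by omega) (by omega), if_neg (by omega), if_neg (by omega)];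
             apply harith; omega)
          | (simp only [hv1, hv2]; apply harith; omega)
      · rw [if_neg hse]
        split_ifs with h1 h2
        · exact pv_getElem?_eq_pyGetD n ra (s + e - p) p 0 hlen hp (by omega)
        · exact pv_getElem?_eq_pyGetD n ra (s + e - ((p : Int) - n)) p 0 hlen hp (by omega)
        · rfl

-- ===== VERDICT (by name: the statement is the Claim_ definition above) =====
theorem reverse_subarray_spec : Claim_equal_reverse_subarray := by
  intro arr s e _ hpre
  unfold Spec_reverse_subarray
  by_cases hes : e < s
  · have hA : (e - s + 1).toNat = 0 := by omega
    have hB : (e - s).toNat = 0 := by omega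
    simp [reverse_subarray, reverse_subarray_alt, hA, hB, pvRevLoop2, pvSwapLoop]
  · rcases hpre with hlt' | ⟨h1, h2, h3⟩
    · omega
    have hse : s ≤ e := by omega
    have hfA : ((e - s + 1).toNat : Int) = e - s + 1 := by omega
    apply List.ext_getElem?
    intro p
    by_cases hp : p < arr.length
    · have harith : ∀ X Y : Int, X = Y →
          some (PySem.List.pyGetD arr X 0) = some (PySem.List.pyGetD arr Y 0) := by
        intro X Y h; rw [h]
      rw [show reverse_subarray arr s e =
          pvRevLoop2 (pvRevLoop1 arr (e - s + 1).toNat e []) (e - s + 1).toNat s 0 arr from rfl]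
      rw [pv_loop2_char arr.length _ _ s 0 arr rfl h1 (by omega) (by omega) p hp]
      rw [show reverse_subarray_alt arr s e = pvSwapLoop (e - s).toNat s e arr from rfl]
      rw [pv_swap_char arr.length _ s e arr rfl h1 h2 h3 (by omega) p hp]
      rw [pv_loop1_eq arr (e - s + 1).toNat e []]
      rw [List.nil_append]
      split_ifs
      all_goals first
        | rfl
        | (exfalso; omega)
        | (rw [Int.zero_add, pv_rev_lookup arr e _ _ (by omega) (by omega)];
           apply harith; omega)
    · rw [List.getElem?_eq_none, List.getElem?_eq_none]
      · rw [show reverse_subarray_alt arr s e = pvSwapLoop (e - s).toNat s e arr from rfl,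
          pv_length_swapLoop]
        omega
      · rw [show reverse_subarray arr s e =
            pvRevLoop2 (pvRevLoop1 arr (e - s + 1).toNat e []) (e - s + 1).toNat s 0 arr from rfl,
          pv_length_loop2]
        omega
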